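-- pv_equiv track=rewrite | github.com/Diego---/QAdaptive | qadaptive/mutation.py | get_locked_circuit_indices
-- ===== SOURCE A (Python) =====
-- LockId = tuple[int, tuple[int, int]]
--
-- TwoQMap = dict[int, tuple[int, int]]
--
-- def get_circuit_index_from_pair_occurrence(
--     occurrence: int,
--     pair: tuple[int, int],
--     two_q_map: TwoQMap,
-- ) -> int | None:
--     """
--     Return the circuit-data index of a two-qubit gate identified by its
--     pair-local occurrence and qubit pair.
--
--     Parameters
--     ----------
--     occurrence : int
--         Pair-local occurrence index.
--     pair : tuple[int, int]
--         Ordered qubit pair.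
--     two_q_map : dict[int, tuple[int, int]]
--         Mapping from circuit-data indices to qubit pairs.
--
--     Returns
--     -------
--     int | None
--         Circuit-data index of the corresponding gate, or None if no such gate exists.
--     """
--     if occurrence < 0:
--         return None
--
--     current_occurrence = 0
--
--     for circ_index in sorted(two_q_map):
--         if two_q_map[circ_index] != pair:
--             continue
--
--         if current_occurrence == occurrence:
--             return circ_index
--
--         current_occurrence += 1
--
--     return None
--
-- def get_locked_circuit_indices(
--     two_q_map: TwoQMap,
--     locked_gates: set[LockId],
-- ) -> list[int]:
--     """
--     Return sorted circuit-data indices of all currently locked two-qubit gates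
--     that still exist in the tracked map.
--     """
--     locked_indices = []
--
--     for occurrence, pair in locked_gates:
--         circ_index = get_circuit_index_from_pair_occurrence(
--             occurrence,
--             pair,
--             two_q_map,
--         )
--         if circ_index is not None:
--             locked_indices.append(circ_index)
--
--     return sorted(locked_indices)
-- ===== SOURCE B (Python) =====
-- def get_locked_circuit_indices(two_q_map, locked_gates):
--     """
--     Return sorted circuit-data indices of all currently locked two-qubit gates
--     that still exist in the tracked map.
--
--     Single ascending pass over sorted(two_q_map) with a running occurrence
--     counter per pair; no per-lock search and no trailing sort.
--     """
--     counts = {}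
--     locked_indices = []
--     for circ_index in sorted(two_q_map):
--         pair = two_q_map[circ_index]
--         occ = counts.get(pair, 0)
--         if (occ, pair) in locked_gates:
--             locked_indices.append(circ_index)
--         counts[pair] = occ + 1
--     return locked_indices
-- ===== Notes on version B (the rewrite author's own statement) =====
-- stated objective: faster
-- what changed: Inverted the loops: instead of searching sorted(two_q_map) from the start once per locked gate via the helper, B makes a single ascending pass over sorted(two_q_map) keeping a per-pair occurrence counter in a dict and appends circ_index exactly when (count, pair) is a locked gate; the result is built already sorted, so the trailing sorted() disappears.
import Mathlib
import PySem

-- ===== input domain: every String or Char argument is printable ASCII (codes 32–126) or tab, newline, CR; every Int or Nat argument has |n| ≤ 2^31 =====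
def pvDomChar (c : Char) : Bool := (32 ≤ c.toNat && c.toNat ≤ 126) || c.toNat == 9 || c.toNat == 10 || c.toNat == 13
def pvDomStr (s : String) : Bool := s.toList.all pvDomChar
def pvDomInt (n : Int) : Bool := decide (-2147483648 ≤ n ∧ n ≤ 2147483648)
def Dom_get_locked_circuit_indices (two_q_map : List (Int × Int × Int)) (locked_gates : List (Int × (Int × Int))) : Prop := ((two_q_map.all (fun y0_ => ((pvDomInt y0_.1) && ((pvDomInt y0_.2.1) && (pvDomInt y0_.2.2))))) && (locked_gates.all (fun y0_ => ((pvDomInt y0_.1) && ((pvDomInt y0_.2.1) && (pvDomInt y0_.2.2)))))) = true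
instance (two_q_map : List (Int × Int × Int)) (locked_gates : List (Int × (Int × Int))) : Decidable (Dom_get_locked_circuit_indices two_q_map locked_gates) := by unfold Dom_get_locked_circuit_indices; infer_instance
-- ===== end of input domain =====

-- B inverts the loops of A: one ascending pass over the sorted circuit indices with a per-pair
-- occurrence counter, instead of one scan of the map per locked gate plus a trailing sort (measured faster
-- in a timing run).

-- ===== PORT A =====
-- the 'for circ_index in sorted(two_q_map): …' loop of get_circuit_index_from_pair_occurrence.
-- two_q_map[circ_index] is ported as getD with a dummy default: every iterated key comes from the
-- dict itself, so the Python lookup never raises and the default is never used (exact there).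
def pvGciLoop (occurrence : Int) (pair : Int × Int) (d : PySem.Dict Int (Int × Int)) :
    List Int → Int → Option Int
  | [], _ => none
  | circ_index :: rest, current_occurrence =>
    if d.getD circ_index (0, 0) ≠ pair then
      pvGciLoop occurrence pair d rest current_occurrence
    else if current_occurrence = occurrence then some circ_index
    else pvGciLoop occurrence pair d rest (current_occurrence + 1)

def get_circuit_index_from_pair_occurrence (occurrence : Int) (pair : Int × Int)
    (two_q_map : PySem.Dict Int (Int × Int)) : Option Int :=
  if occurrence < 0 then none
  else pvGciLoop occurrence pair two_q_map
    (PySem.List.sorted two_q_map.keys (fun x => x) false) 0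

-- the result is sorted at the end, so it does not depend on the set's iteration order
def get_locked_circuit_indices (two_q_map : List (Int × Int × Int))
    (locked_gates : List (Int × (Int × Int))) : List Int :=
  let d : PySem.Dict Int (Int × Int) := PySem.Dict.ofList two_q_map
  let locks : PySem.Set (Int × (Int × Int)) := PySem.Set.ofList locked_gates
  let locked_indices := locks.foldl (fun acc l =>
    match get_circuit_index_from_pair_occurrence l.1 l.2 d with
    | some circ_index => acc ++ [circ_index]
    | none => acc) []
  PySem.List.sorted locked_indices (fun x => x) false

-- ===== PORT B =====
-- single pass over the sorted keys; counts tracks how often each pair has been seen so far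
def pvAltLoop (d : PySem.Dict Int (Int × Int)) (locks : PySem.Set (Int × (Int × Int))) :
    List Int → PySem.Dict (Int × Int) Int → List Int → List Int
  | [], _, locked_indices => locked_indices
  | circ_index :: rest, counts, locked_indices =>
    let pair := d.getD circ_index (0, 0)
    let occ := counts.getD pair 0
    let locked_indices' :=
      if PySem.Set.contains locks (occ, pair) then locked_indices ++ [circ_index]
      else locked_indices
    pvAltLoop d locks rest (counts.insert pair (occ + 1)) locked_indices'

def get_locked_circuit_indices_alt (two_q_map : List (Int × Int × Int))
    (locked_gates : List (Int × (Int × Int))) : List Int :=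
  let d : PySem.Dict Int (Int × Int) := PySem.Dict.ofList two_q_map
  let locks : PySem.Set (Int × (Int × Int)) := PySem.Set.ofList locked_gates
  pvAltLoop d locks (PySem.List.sorted d.keys (fun x => x) false) PySem.Dict.empty []

-- ===== PRECONDITION & SPEC =====
def Spec_get_locked_circuit_indices (two_q_map : List (Int × Int × Int)) (locked_gates : List (Int × (Int × Int))) (out : List Int) : Prop := out = get_locked_circuit_indices_alt two_q_map locked_gates
instance (two_q_map : List (Int × Int × Int)) (locked_gates : List (Int × (Int × Int))) (out : List Int) : Decidable (Spec_get_locked_circuit_indices two_q_map locked_gates out) := by unfold Spec_get_locked_circuit_indices; infer_instance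

-- ===== CLAIM (what is proved, stated in full; the proofs are below) =====
def Claim_equal_get_locked_circuit_indices : Prop := ∀ (two_q_map : List (Int × Int × Int)) (locked_gates : List (Int × (Int × Int))), Dom_get_locked_circuit_indices two_q_map locked_gates → Spec_get_locked_circuit_indices two_q_map locked_gates (get_locked_circuit_indices two_q_map locked_gates)

-- ===== LEMMAS AND PROOFS =====

-- the canonical selection predicate both programs compute: circ_index is kept iff the pair it maps
-- to, with its occurrence rank among the sorted keys mapping to that pair, is a locked gate
def pvPred (d : PySem.Dict Int (Int × Int)) (locks : List (Int × (Int × Int)))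
    (ks : List Int) (k : Int) : Bool :=
  PySem.Set.contains locks
    ((((ks.filter (fun x => d.getD x (0, 0) == d.getD k (0, 0))).idxOf k : Nat) : Int),
      d.getD k (0, 0))

-- A's 'if circ_index is not None: append' loop is a filterMap
theorem pv_foldl_match {α : Type} (f : α → Option Int) (l : List α) (acc : List Int) :
    l.foldl (fun acc x => match f x with | some i => acc ++ [i] | none => acc) acc
      = acc ++ l.filterMap f := by
  induction l generalizing acc with
  | nil => simp
  | cons x t ih =>
    simp only [List.foldl_cons, List.filterMap_cons]
    cases h : f x <;> simp [ih]


-- nth element of a duplicate-free list, characterised by idxOf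
theorem pv_getElem?_nodup (F : List Int) (hF : F.Nodup) (n : Nat) (k : Int) :
    F[n]? = some k ↔ k ∈ F ∧ F.idxOf k = n := by
  constructor
  · intro h
    rcases List.getElem?_eq_some_iff.mp h with ⟨hlt, hk⟩
    subst hk
    exact ⟨List.getElem_mem hlt, List.Nodup.idxOf_getElem hF n hlt⟩
  · rintro ⟨hmem, rfl⟩
    exact List.getElem?_eq_some_iff.mpr
      ⟨List.idxOf_lt_length_iff.mpr hmem, List.getElem_idxOf _⟩

-- the helper loop walks the filtered key list
theorem pvGciLoop_eq (d : PySem.Dict Int (Int × Int)) (pair : Int × Int) (occ : Int)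
    (ks : List Int) :
    ∀ cur : Int, 0 ≤ cur → cur ≤ occ →
      pvGciLoop occ pair d ks cur
        = (ks.filter (fun x => d.getD x (0, 0) == pair))[(occ - cur).toNat]? := by
  induction ks with
  | nil => intro cur _ _; simp [pvGciLoop]
  | cons k rest ih =>
    intro cur h0 hle
    by_cases hp : d.getD k (0, 0) = pair
    · by_cases hc : cur = occ
      · subst hc
        simp [pvGciLoop, hp]
      · have hlt : cur < occ := lt_of_le_of_ne hle hc
        have : pvGciLoop occ pair d (k :: rest) cur
            = pvGciLoop occ pair d rest (cur + 1) := by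
          simp [pvGciLoop, hp, hc]
        rw [this, ih (cur + 1) (by omega) (by omega)]
        rw [List.filter_cons_of_pos (p := fun x => d.getD x (0, 0) == pair) (by simp [hp])]
        have h1 : (occ - cur).toNat = ((occ - (cur + 1)).toNat) + 1 := by omega
        simp [h1]
    · have : pvGciLoop occ pair d (k :: rest) cur = pvGciLoop occ pair d rest cur := by
        simp [pvGciLoop, hp]
      rw [this, ih cur h0 hle]
      rw [List.filter_cons_of_neg (p := fun x => d.getD x (0, 0) == pair) (by simp [hp])]

-- full characterisation of the helper on a duplicate-free key order
theorem pv_helper_eq_some_iff (d : PySem.Dict Int (Int × Int)) (occ : Int) (pair : Int × Int)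
    (k : Int) (hnd : (PySem.List.sorted d.keys (fun x => x) false).Nodup) :
    get_circuit_index_from_pair_occurrence occ pair d = some k ↔
      k ∈ PySem.List.sorted d.keys (fun x => x) false ∧ d.getD k (0, 0) = pair ∧
        occ = (((PySem.List.sorted d.keys (fun x => x) false).filter
          (fun x => d.getD x (0, 0) == pair)).idxOf k : Int) := by
  set ks := PySem.List.sorted d.keys (fun x => x) false with hks
  unfold get_circuit_index_from_pair_occurrence
  by_cases hneg : occ < 0
  · simp only [if_pos hneg]
    constructor
    · intro h; cases h
    · rintro ⟨_, _, hocc⟩; omega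
  · rw [if_neg hneg, ← hks, pvGciLoop_eq d pair occ ks 0 le_rfl (by omega)]
    have hFnd : (ks.filter (fun x => d.getD x (0, 0) == pair)).Nodup := hnd.filter _
    rw [pv_getElem?_nodup _ hFnd]
    simp only [List.mem_filter, beq_iff_eq]
    constructor
    · rintro ⟨⟨hmem, hpair⟩, hidx⟩
      exact ⟨hmem, hpair, by omega⟩
    · rintro ⟨hmem, hpair, hocc⟩
      refine ⟨⟨hmem, hpair⟩, by omega⟩

-- B's loop computes the filter by pvPred, given the counter invariant
theorem pvAltLoop_eq (d : PySem.Dict Int (Int × Int)) (locks : PySem.Set (Int × (Int × Int)))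
    (ks : List Int) (hnd : ks.Nodup) :
    ∀ (rest pre : List Int) (counts : PySem.Dict (Int × Int) Int) (acc : List Int),
      ks = pre ++ rest →
      (∀ p : Int × Int, counts.getD p 0
          = ((pre.filter (fun x => d.getD x (0, 0) == p)).length : Int)) →
      pvAltLoop d locks rest counts acc = acc ++ rest.filter (pvPred d locks ks) := by
  intro rest
  induction rest with
  | nil => intro pre counts acc _ _; simp [pvAltLoop]
  | cons k rest ih =>
    intro pre counts acc hsplit hinv
    have hknotpre : k ∉ pre := by
      have h2 := hsplit ▸ hnd
      rcases List.nodup_append.mp h2 with ⟨_, _, hdisj⟩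
      intro hk
      exact hdisj k hk k List.mem_cons_self rfl
    -- the occurrence counter equals k's index in the filtered full key list
    have hocc : counts.getD (d.getD k (0, 0)) 0
        = (((ks.filter (fun x => d.getD x (0, 0) == d.getD k (0, 0))).idxOf k : Nat) : Int) := by
      rw [hinv (d.getD k (0, 0))]
      congr 1
      rw [hsplit, List.filter_append, List.filter_cons_of_pos (by simp)]
      rw [List.idxOf_append_of_notMem (by simp [hknotpre]), List.idxOf_cons_self]
      omega
    have hstep : ∀ p : Int × Int,
        (counts.insert (d.getD k (0, 0)) (counts.getD (d.getD k (0, 0)) 0 + 1)).getD p 0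
          = (((pre ++ [k]).filter (fun x => d.getD x (0, 0) == p)).length : Int) := by
      intro p
      rw [PySem.Dict.getD_insert, List.filter_append]
      by_cases hp : p = d.getD k (0, 0)
      · subst hp
        rw [if_pos rfl, hinv (d.getD k (0, 0))]
        have h1 : ([k].filter (fun x => d.getD x (0, 0) == d.getD k (0, 0))).length = 1 := by simp
        rw [List.length_append, h1]
        push_cast
        ring
      · rw [if_neg hp, hinv p, List.filter_cons]
        simp [Ne.symm hp]
    have := ih (pre ++ [k]) (counts.insert (d.getD k (0, 0)) (counts.getD (d.getD k (0, 0)) 0 + 1))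
      (if PySem.Set.contains locks (counts.getD (d.getD k (0, 0)) 0, d.getD k (0, 0))
        then acc ++ [k] else acc)
      (by rw [hsplit, List.append_cons]) hstep
    have hceq : PySem.Set.contains locks (counts.getD (d.getD k (0, 0)) 0, d.getD k (0, 0))
        = pvPred d locks ks k := by
      unfold pvPred; rw [hocc]
    simp only [pvAltLoop]
    rw [this, hceq, List.filter_cons]
    cases hc : pvPred d locks ks k <;> simp

-- ===== VERDICT (by name: the statement is the Claim_ definition above) =====
theorem get_locked_circuit_indices_spec : Claim_equal_get_locked_circuit_indices := by
  intro two_q_map locked_gates _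
  unfold Spec_get_locked_circuit_indices
  unfold get_locked_circuit_indices get_locked_circuit_indices_alt
  set d : PySem.Dict Int (Int × Int) := PySem.Dict.ofList two_q_map with hd
  set locks : PySem.Set (Int × (Int × Int)) := PySem.Set.ofList locked_gates with hlocks
  set ks := PySem.List.sorted d.keys (fun x => x) false with hks
  have hksnd : ks.Nodup :=
    (List.Perm.nodup_iff (PySem.List.sorted_perm _ _ _)).mpr (PySem.Dict.nodup_keys_ofList _)
  have hlocksnd : locks.Nodup := PySem.Set.nodup_ofList _
  have hkslt : ks.Pairwise (fun a b => a < b) := by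
    have hle : ks.Pairwise (fun a b => a ≤ b) := PySem.List.sorted_pairwise _ _
    exact (hle.and hksnd).imp (fun h => lt_of_le_of_ne h.1 h.2)
  -- B's side
  have hB : pvAltLoop d locks ks PySem.Dict.empty [] = ks.filter (pvPred d locks ks) := by
    have := pvAltLoop_eq d locks ks hksnd ks [] PySem.Dict.empty []
      (by simp) (by intro p; simp [PySem.Dict.getD_empty])
    simpa using this
  -- A's side
  have hA : PySem.List.sorted
      (locks.foldl (fun acc l =>
        match get_circuit_index_from_pair_occurrence l.1 l.2 d with
        | some circ_index => acc ++ [circ_index]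
        | none => acc) []) (fun x => x) false
      = ks.filter (pvPred d locks ks) := by
    rw [pv_foldl_match (fun l => get_circuit_index_from_pair_occurrence l.1 l.2 d) locks []]
    simp only [List.nil_append]
    -- characterise membership of the collected list
    have hchar : ∀ (l : Int × (Int × Int)) (k : Int),
        get_circuit_index_from_pair_occurrence l.1 l.2 d = some k ↔
          k ∈ ks ∧ l = ((((ks.filter (fun x => d.getD x (0, 0) == d.getD k (0, 0))).idxOf k : Nat) : Int),
            d.getD k (0, 0)) := by
      intro l k
      rw [pv_helper_eq_some_iff d l.1 l.2 k (hks ▸ hksnd)]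
      constructor
      · rintro ⟨hmem, hpair, hocc⟩
        refine ⟨hks ▸ hmem, ?_⟩
        obtain ⟨l1, l2⟩ := l
        simp only at hpair hocc ⊢
        rw [Prod.mk.injEq]
        exact ⟨by rw [hocc, hpair], hpair.symm⟩
      · rintro ⟨hmem, rfl⟩
        exact ⟨hks ▸ hmem, rfl, rfl⟩
    have hnodupF : (locks.filterMap
        (fun l => get_circuit_index_from_pair_occurrence l.1 l.2 d)).Nodup := by
      refine List.Nodup.filterMap ?_ hlocksnd
      intro a a' b hb hb'
      rw [Option.mem_def, hchar a b] at hb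
      rw [Option.mem_def, hchar a' b] at hb'
      rw [hb.2, hb'.2]
    have hmemiff : ∀ k : Int,
        k ∈ locks.filterMap (fun l => get_circuit_index_from_pair_occurrence l.1 l.2 d)
          ↔ k ∈ ks.filter (pvPred d locks ks) := by
      intro k
      rw [List.mem_filterMap, List.mem_filter]
      constructor
      · rintro ⟨l, hl, hsome⟩
        rw [hchar l k] at hsome
        refine ⟨hsome.1, ?_⟩
        unfold pvPred
        have : ((((ks.filter (fun x => d.getD x (0, 0) == d.getD k (0, 0))).idxOf k : Nat) : Int),
            d.getD k (0, 0)) ∈ locks := hsome.2 ▸ hl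
        exact List.contains_iff_mem.mpr this
      · rintro ⟨hmem, hpred⟩
        unfold pvPred at hpred
        refine ⟨_, List.contains_iff_mem.mp hpred, ?_⟩
        rw [hchar]
        exact ⟨hmem, rfl⟩
    have hperm : (ks.filter (pvPred d locks ks)).Perm
        (locks.filterMap (fun l => get_circuit_index_from_pair_occurrence l.1 l.2 d)) :=
      (List.perm_ext_iff_of_nodup (hksnd.filter _) hnodupF).mpr
        (fun a => (hmemiff a).symm)
    exact PySem.List.sorted_eq_of_perm_of_pairwise_lt _ _ _ hperm (hkslt.filter _)
  rw [hA, hB]
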